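-- pv_equiv track=rewrite | github.com/dkylewillis/vector | src/agents/research_agent.py | _find_matching_topic_key
-- ===== SOURCE A (Python) =====
-- from typing import List, Dict, Any, Optional
--
-- def _find_matching_topic_key(topic: str, topics_data: Dict[str, Any]) -> str:
--     """Find matching topic key in topics_data for a given topic string."""
--     topic_lower = topic.lower().replace(' ', '_')
--
--     # Direct match
--     for key in topics_data.keys():
--         if key.lower() == topic_lower:
--             return key
--
--     # Partial match
--     for key in topics_data.keys():
--         if topic_lower in key.lower() or key.lower() in topic_lower:
--             return key
--
--     return None
-- ===== SOURCE B (Python) =====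
-- def _find_matching_topic_key(topic, topics_data):
--     """Find matching topic key: single pass, exact match wins, first partial kept."""
--     topic_lower = topic.lower().replace(' ', '_')
--     partial = None
--     for key in topics_data.keys():
--         key_lower = key.lower()
--         if key_lower == topic_lower:
--             return key
--         if partial is None and (topic_lower in key_lower or key_lower in topic_lower):
--             partial = key
--     return partial
-- ===== Notes on version B (the rewrite author's own statement) =====
-- stated objective: simpler
-- what changed: Replaces A's two full passes over the keys by a single pass that returns immediately on an exact match and remembers only the first partial-match candidate, returned after the loop.
import Mathlib
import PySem

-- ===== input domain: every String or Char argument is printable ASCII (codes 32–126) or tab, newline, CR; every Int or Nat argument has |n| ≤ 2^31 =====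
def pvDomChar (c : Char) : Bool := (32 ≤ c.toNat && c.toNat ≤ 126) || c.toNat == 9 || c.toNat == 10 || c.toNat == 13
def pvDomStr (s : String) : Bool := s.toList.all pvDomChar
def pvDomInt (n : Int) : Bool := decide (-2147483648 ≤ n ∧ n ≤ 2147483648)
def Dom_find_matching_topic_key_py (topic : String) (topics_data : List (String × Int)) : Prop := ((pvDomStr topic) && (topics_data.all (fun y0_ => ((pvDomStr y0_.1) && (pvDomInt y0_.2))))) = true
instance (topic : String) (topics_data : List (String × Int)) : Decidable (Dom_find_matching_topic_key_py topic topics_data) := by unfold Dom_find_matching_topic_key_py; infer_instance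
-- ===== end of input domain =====

-- ===== PORT A =====
-- A: two passes — first an exact-match scan, then a partial-match scan (both with early return).
def pvALoopExact (tl : String) : List (String × Int) → Option String
  | [] => none
  | kv :: rest => if PySem.Str.lower kv.1 == tl then some kv.1 else pvALoopExact tl rest

def pvALoopPartial (tl : String) : List (String × Int) → Option String
  | [] => none
  | kv :: rest =>
      if PySem.Str.isIn tl (PySem.Str.lower kv.1) || PySem.Str.isIn (PySem.Str.lower kv.1) tl
      then some kv.1 else pvALoopPartial tl rest

def find_matching_topic_key_py (topic : String) (topics_data : List (String × Int)) : Option String :=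
  let topic_lower := PySem.Str.replace (PySem.Str.lower topic) " " "_"
  match pvALoopExact topic_lower topics_data with
  | some k => some k
  | none => pvALoopPartial topic_lower topics_data

-- ===== PORT B =====
-- B: one pass, early return on exact match, carrying the first partial-match candidate.
def pvBLoop (tl : String) (partial_ : Option String) : List (String × Int) → Option String
  | [] => partial_
  | kv :: rest =>
      let kl := PySem.Str.lower kv.1
      if kl == tl then some kv.1
      else pvBLoop tl
        (if partial_.isNone && (PySem.Str.isIn tl kl || PySem.Str.isIn kl tl)
         then some kv.1 else partial_) rest

def find_matching_topic_key_py_alt (topic : String) (topics_data : List (String × Int)) : Option String :=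
  let topic_lower := PySem.Str.replace (PySem.Str.lower topic) " " "_"
  pvBLoop topic_lower none topics_data

-- ===== PRECONDITION & SPEC =====
def Spec_find_matching_topic_key_py (topic : String) (topics_data : List (String × Int)) (out : Option String) : Prop := out = find_matching_topic_key_py_alt topic topics_data
instance (topic : String) (topics_data : List (String × Int)) (out : Option String) : Decidable (Spec_find_matching_topic_key_py topic topics_data out) := by unfold Spec_find_matching_topic_key_py; infer_instance

-- ===== CLAIM (what is proved, stated in full; the proofs are below) =====
def Claim_equal_find_matching_topic_key_py : Prop := ∀ (topic : String) (topics_data : List (String × Int)), Dom_find_matching_topic_key_py topic topics_data → Spec_find_matching_topic_key_py topic topics_data (find_matching_topic_key_py topic topics_data)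

-- ===== LEMMAS AND PROOFS =====

-- ===== VERDICT (by name: the statement is the Claim_ definition above) =====
-- Invariant of B's loop: with candidate c it returns the exact-match result if any,
-- otherwise c if set, otherwise the partial-match result.
theorem pvBLoop_char (tl : String) (c : Option String) (xs : List (String × Int)) :
    pvBLoop tl c xs =
      match pvALoopExact tl xs with
      | some k => some k
      | none => match c with
        | some p => some p
        | none => pvALoopPartial tl xs := by
  induction xs generalizing c with
  | nil => cases c <;> simp [pvBLoop, pvALoopExact, pvALoopPartial]
  | cons kv rest ih =>
      simp only [pvBLoop, pvALoopExact, pvALoopPartial]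
      by_cases he : PySem.Str.lower kv.1 == tl
      · simp [he]
      · simp only [he]
        rw [ih]
        cases c with
        | some p => cases pvALoopExact tl rest <;> simp
        | none =>
            cases hE : pvALoopExact tl rest with
            | none =>
                by_cases hp : (PySem.Str.isIn tl (PySem.Str.lower kv.1) || PySem.Str.isIn (PySem.Str.lower kv.1) tl) = true
                · simp at hp ⊢; simp [hp]
                · simp at hp ⊢; simp [hp.1, hp.2]
            | some k =>
                simp_all

theorem find_matching_topic_key_py_spec : Claim_equal_find_matching_topic_key_py := by
  intro topic topics_data _
  unfold Spec_find_matching_topic_key_py find_matching_topic_key_py find_matching_topic_key_py_alt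
  rw [pvBLoop_char]
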